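-- pv_equiv track=rewrite | github.com/LatifY/coding-problems | tallest-skyscraper.py | tallest_skyscraper
-- ===== SOURCE A (Python) =====
-- def tallest_skyscraper(lst):
--     ss = []
--     for i in range(len(lst[0])):
--         subss = []
--         for a in lst:
--             subss.append(a[i])
--         ss.append(subss)
--     for x in range(len(ss)):
--         ss[x] = list(filter((0).__ne__, ss[x]))
--     m = max(len(a) for a in ss)
--     return m
-- ===== SOURCE B (Python) =====
-- def tallest_skyscraper(lst):
--     counts = [0] * len(lst[0])
--     for a in lst:
--         for i in range(len(lst[0])):
--             if a[i] != 0: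
--                 counts[i] += 1
--     return max(counts)
-- ===== Notes on version B (the rewrite author's own statement) =====
-- stated objective: simpler
-- what changed: Replaces the transpose-then-filter construction (build every column list, zero-filter each, take max length) by a single pass over the rows that increments a per-column counter and returns max(counts); no transposed copy or intermediate filtered lists are built.
import Mathlib
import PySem

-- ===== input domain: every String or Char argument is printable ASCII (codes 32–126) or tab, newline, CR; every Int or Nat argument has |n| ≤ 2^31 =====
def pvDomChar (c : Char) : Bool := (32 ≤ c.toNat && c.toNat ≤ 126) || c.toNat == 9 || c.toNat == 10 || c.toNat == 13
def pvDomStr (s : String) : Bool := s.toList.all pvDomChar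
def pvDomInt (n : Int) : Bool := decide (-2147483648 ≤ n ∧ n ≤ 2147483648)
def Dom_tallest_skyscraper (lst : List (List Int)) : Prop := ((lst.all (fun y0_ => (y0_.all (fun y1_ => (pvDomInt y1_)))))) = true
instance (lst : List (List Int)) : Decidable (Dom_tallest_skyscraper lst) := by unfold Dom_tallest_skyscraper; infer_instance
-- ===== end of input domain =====

-- B replaces A's transpose-then-filter construction by a single row pass over a per-column
-- counter vector (objective: simpler, O(cols) extra space instead of a full transposed copy).

-- ===== PORT A =====
-- transpose columns (a[i] for each row a), zero-filter each column, max of lengths;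
-- row/column accesses are in range under Pre_, so List.getD is exact there.
def tallest_skyscraper (lst : List (List Int)) : Int :=
  let ss := (List.range (lst.headD []).length).map
    (fun i => lst.foldl (fun subss a => subss ++ [a.getD i 0]) [])
  let ss2 := ss.map (fun col => col.filter (fun v => decide (v ≠ 0)))
  match ss2.map (fun a => (a.length : Int)) with
  | [] => 0                    -- unreachable under Pre_ (Python: max() of empty raises ValueError)
  | h :: t => t.foldl (fun m x => max m x) h

-- ===== PORT B =====
def tallest_skyscraper_alt (lst : List (List Int)) : Int :=
  let n := (lst.headD []).length
  let counts := lst.foldl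
    (fun c a => (List.range n).foldl
      (fun c i => if a.getD i 0 ≠ 0 then c.set i (c.getD i 0 + 1) else c) c)
    (List.replicate n (0 : Int))
  match counts with
  | [] => 0                    -- unreachable under Pre_ (Python: max([]) raises ValueError)
  | h :: t => t.foldl (fun m x => max m x) h

-- ===== PRECONDITION & SPEC =====
-- Pre_ excludes exactly the inputs where Python A raises: empty lst (IndexError on lst[0]),
-- an empty first row (ValueError: max of empty sequence), and rows shorter than lst[0] (IndexError).
def Pre_tallest_skyscraper (lst : List (List Int)) : Prop :=
  lst ≠ [] ∧ 0 < (lst.headD []).length ∧ ∀ row ∈ lst, (lst.headD []).length ≤ row.length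
instance (lst : List (List Int)) : Decidable (Pre_tallest_skyscraper lst) := by
  unfold Pre_tallest_skyscraper; infer_instance

def pvWitness_tallest_skyscraper : List (List Int) := [[1, 0], [2, 3], [0, 5]]

def Spec_tallest_skyscraper (lst : List (List Int)) (out : Int) : Prop := out = tallest_skyscraper_alt lst
instance (lst : List (List Int)) (out : Int) : Decidable (Spec_tallest_skyscraper lst out) := by unfold Spec_tallest_skyscraper; infer_instance

-- ===== CLAIM (what is proved, stated in full; the proofs are below) =====
def Claim_equal_tallest_skyscraper : Prop := ∀ (lst : List (List Int)), Dom_tallest_skyscraper lst → Pre_tallest_skyscraper lst → Spec_tallest_skyscraper lst (tallest_skyscraper lst)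

-- ===== LEMMAS AND PROOFS =====

-- the inner-loop body of B's port
def pvStep (a : List Int) (c : List Int) (i : Nat) : List Int :=
  if a.getD i 0 ≠ 0 then c.set i (c.getD i 0 + 1) else c

lemma pvStep_length (a : List Int) (c : List Int) (i : Nat) :
    (pvStep a c i).length = c.length := by
  unfold pvStep; split <;> simp

lemma pvFold_length (a : List Int) (is : List Nat) (c : List Int) :
    (is.foldl (pvStep a) c).length = c.length := by
  induction is generalizing c with
  | nil => rfl
  | cons i is ih => simp [List.foldl_cons, ih, pvStep_length]

-- after the inner loop over a Nodup list of in-range indices, entry j grew by 0 or 1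
lemma pvFold_getD (a : List Int) (is : List Nat) (c : List Int) (j : Nat)
    (hnd : is.Nodup) (hlt : ∀ i ∈ is, i < c.length) :
    (is.foldl (pvStep a) c).getD j 0 =
      c.getD j 0 + (if j ∈ is ∧ a.getD j 0 ≠ 0 then 1 else 0) := by
  induction is generalizing c with
  | nil => simp
  | cons i is ih =>
    simp only [List.foldl_cons]
    have hnd' := hnd
    simp only [List.nodup_cons] at hnd'
    rw [ih (pvStep a c i) hnd'.2 (by intro k hk; rw [pvStep_length]; exact hlt k (.tail _ hk))]
    by_cases hji : j = i
    · subst hji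
      have hj : j < c.length := hlt j (.head _)
      have hmem : j ∉ is := hnd'.1
      simp only [pvStep, List.getD] at *
      by_cases ha : a[j]?.getD 0 = 0
      · simp [ha, hmem]
      · simp [ha, hmem, hj]
    · have hstep : (pvStep a c i).getD j 0 = c.getD j 0 := by
        unfold pvStep; split
        · simp [List.getD, Ne.symm hji]
        · rfl
      rw [hstep]
      simp [hji]

-- column-j nonzero count over the rows
def pvCnt (lst : List (List Int)) (j : Nat) : Nat :=
  lst.countP (fun a => decide (a.getD j 0 ≠ 0))

lemma pvOuter_length (lst : List (List Int)) (n : Nat) (c : List Int) :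
    (lst.foldl (fun c a => (List.range n).foldl (pvStep a) c) c).length = c.length := by
  induction lst generalizing c with
  | nil => rfl
  | cons a lst ih => simp [List.foldl_cons, ih, pvFold_length]

lemma pvOuter_getD (lst : List (List Int)) (n : Nat) (c : List Int) (j : Nat)
    (hjn : j < n) (hc : c.length = n) :
    (lst.foldl (fun c a => (List.range n).foldl (pvStep a) c) c).getD j 0 =
      c.getD j 0 + (pvCnt lst j : Int) := by
  induction lst generalizing c with
  | nil => simp [pvCnt]
  | cons a lst ih =>
    simp only [List.foldl_cons]
    rw [ih ((List.range n).foldl (pvStep a) c) (by rw [pvFold_length]; exact hc)]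
    rw [pvFold_getD a (List.range n) c j (List.nodup_range) (by intro i hi; rw [hc]; exact List.mem_range.mp hi)]
    simp only [pvCnt, List.countP_cons]
    by_cases ha : a.getD j 0 ≠ 0
    · simp only [List.getD] at ha
      simp [ha, List.mem_range.mpr hjn]
      ring
    · simp only [List.getD] at ha ⊢
      simp [ha]

-- B's counts vector equals A's list of filtered column lengths
lemma pvCounts_eq (lst : List (List Int)) (n : Nat) :
    (lst.foldl (fun c a => (List.range n).foldl (pvStep a) c) (List.replicate n (0 : Int))) =
      (List.range n).map (fun i =>
        (((lst.foldl (fun subss a => subss ++ [a.getD i 0]) []).filter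
          (fun v => decide (v ≠ 0))).length : Int)) := by
  have hcol : ∀ i : Nat, lst.foldl (fun subss a => subss ++ [a.getD i 0]) [] =
      lst.map (fun a => a.getD i 0) := by
    intro i
    simpa using PySem.List.foldl_append_singleton_eq_map (fun a : List Int => a.getD i 0) lst []
  apply List.ext_getElem
  · simp [pvOuter_length]
  · intro j h1 h2
    have hjn : j < n := by simpa [pvOuter_length] using h1
    have hA := pvOuter_getD lst n (List.replicate n (0 : Int)) j hjn (by simp)
    rw [List.getD_eq_getElem _ _ h1, List.getD_replicate] at hA
    rw [hA]
    rw [List.getElem_map, List.getElem_range, hcol j]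
    rw [← List.countP_eq_length_filter, List.countP_map]
    simp [pvCnt]
    rfl
    exact hjn

-- ===== VERDICT (by name: the statement is the Claim_ definition above) =====
theorem tallest_skyscraper_spec : Claim_equal_tallest_skyscraper := by
  intro lst _ _
  unfold Spec_tallest_skyscraper tallest_skyscraper tallest_skyscraper_alt
  simp only [List.map_map]
  rw [show (fun c a => (List.range (lst.headD []).length).foldl
      (fun c i => if a.getD i 0 ≠ 0 then c.set i (c.getD i 0 + 1) else c) c)
      = (fun c a => (List.range (lst.headD []).length).foldl (pvStep a) c) from rfl]
  rw [pvCounts_eq lst (lst.headD []).length]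
  rfl
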